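-- pv_equiv track=rewrite | github.com/isaackogan/TikTokLive | scripts/proto/gen_events.py | _aggregate_type_imports
-- ===== SOURCE A (Python) =====
-- import collections
-- from typing import Any, Dict, Iterator, List, Optional, Set, Tuple, Type, Union, get_args, get_origin, get_type_hints
--
-- def _aggregate_type_imports(
--     type_imports: Set[Tuple[str, str]],
--     events_by_module: List[Tuple[str, List[str]]],
--     collisions: Dict[str, str],
-- ) -> List[Tuple[str, List[Tuple[str, Optional[str]]]]]:
--     """Group (module, name) pairs by module for deterministic import rendering.
--
--     Each rendered entry is ``(name, alias)`` where ``alias`` is ``None`` for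
--     the common case and ``"_proto_<name>"`` when a v3 type-name collides with
--     a generated event class (e.g. v3's ``BarrageEvent`` field type vs our
--     ``BarrageEvent`` subclass).
--
--     Skips the ``ExtendedUser`` / ``ExtendedGift`` shims (handled by a hand-written
--     import in the template) and the parent message classes (already imported via
--     ``events_by_module`` so the subclass declaration resolves).
--     """
--     parent_imports = {(mod, name) for mod, names in events_by_module for name in names}
--     grouped: Dict[str, List[Tuple[str, Optional[str]]]] = collections.defaultdict(list)
--     for mod, name in type_imports:
--         if name in {"ExtendedUser", "ExtendedGift"}:
--             continue
--         if (mod, name) in parent_imports: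
--             continue
--         alias = collisions.get(name)
--         grouped[mod].append((name, alias))
--     return [(m, sorted(set(items))) for m, items in sorted(grouped.items())]
-- ===== SOURCE B (Python) =====
-- import itertools
-- from typing import Dict, List, Optional, Set, Tuple
--
--
-- def _aggregate_type_imports(
--     type_imports: Set[Tuple[str, str]],
--     events_by_module: List[Tuple[str, List[str]]],
--     collisions: Dict[str, str],
-- ) -> List[Tuple[str, List[Tuple[str, Optional[str]]]]]:
--     parent_imports = {(mod, name) for mod, names in events_by_module for name in names}
--     flat = sorted(
--         ((mod, name, collisions.get(name))
--          for mod, name in type_imports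
--          if name not in {"ExtendedUser", "ExtendedGift"}
--          and (mod, name) not in parent_imports),
--         key=lambda t: t[0],
--     )
--     return [
--         (mod, sorted(set((name, alias) for _, name, alias in group)))
--         for mod, group in itertools.groupby(flat, key=lambda t: t[0])
--     ]
-- ===== Notes on version B (the rewrite author's own statement) =====
-- stated objective: idiomatic
-- what changed: Replaces the defaultdict accumulation keyed per module with building one flat filtered list of (module, name, alias) tuples, sorting it by module and grouping with itertools.groupby.
import Mathlib
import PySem

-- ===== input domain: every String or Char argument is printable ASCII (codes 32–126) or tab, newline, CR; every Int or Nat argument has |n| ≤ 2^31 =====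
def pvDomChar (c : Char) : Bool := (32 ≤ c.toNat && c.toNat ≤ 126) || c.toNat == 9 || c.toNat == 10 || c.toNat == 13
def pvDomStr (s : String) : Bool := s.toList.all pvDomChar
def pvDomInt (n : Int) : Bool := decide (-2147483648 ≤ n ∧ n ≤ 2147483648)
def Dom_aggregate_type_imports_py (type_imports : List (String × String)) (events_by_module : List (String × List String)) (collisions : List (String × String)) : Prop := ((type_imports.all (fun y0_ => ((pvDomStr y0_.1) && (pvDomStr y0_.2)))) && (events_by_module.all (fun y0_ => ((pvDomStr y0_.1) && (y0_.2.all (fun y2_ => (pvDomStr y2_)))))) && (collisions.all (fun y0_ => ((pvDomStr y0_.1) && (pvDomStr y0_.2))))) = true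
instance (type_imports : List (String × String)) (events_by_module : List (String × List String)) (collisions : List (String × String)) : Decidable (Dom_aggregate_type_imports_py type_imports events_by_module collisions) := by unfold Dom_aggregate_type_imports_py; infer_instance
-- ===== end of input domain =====

-- B replaces A's defaultdict accumulation + per-key sorting with a flat filtered list sorted
-- by module and grouped with itertools.groupby (idiomatic; same cost).
-- NOTE on sorting keys: A's Python sorts tuples; here every sorted call is keyed on the FIRST
-- component only, which is exact because first components are distinct wherever Python would
-- compare second components (dict keys are unique; the alias is a function of the name).

-- ===== PORT A =====
def aggregate_type_imports_py (type_imports : List (String × String)) (events_by_module : List (String × List String)) (collisions : List (String × String)) : List (String × (List (String × Option String))) :=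
  let parent_imports : PySem.Set (String × String) :=
    PySem.Set.ofList (events_by_module.flatMap (fun p => p.2.map (fun name => (p.1, name))))
  let cd : PySem.Dict String String := PySem.Dict.ofList collisions
  let grouped : PySem.Dict String (List (String × Option String)) :=
    type_imports.foldl (fun d p =>
      if p.2 == "ExtendedUser" || p.2 == "ExtendedGift" then d
      else if parent_imports.contains (p.1, p.2) then d
      else d.modify p.1 [] (fun items => items ++ [(p.2, cd.get? p.2)])) PySem.Dict.empty
  (PySem.List.sorted grouped.items (fun q => q.1) false).map
    (fun q => (q.1, PySem.List.sorted (PySem.Set.ofList q.2) (fun r => r.1) false))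

-- ===== PORT B =====
-- itertools.groupby over a list: maximal runs of consecutive equal keys (key = first component)
def pyGroupby (l : List (String × (String × Option String))) : List (String × List (String × Option String)) :=
  match l with
  | [] => []
  | (m, v) :: rest =>
    (m, v :: (rest.takeWhile (fun t => t.1 == m)).map (fun t => t.2)) ::
      pyGroupby (rest.dropWhile (fun t => t.1 == m))
termination_by l.length
decreasing_by
  simp only [List.length_cons]
  exact Nat.lt_succ_of_le (List.length_dropWhile_le _ rest)

def aggregate_type_imports_py_alt (type_imports : List (String × String)) (events_by_module : List (String × List String)) (collisions : List (String × String)) : List (String × (List (String × Option String))) :=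
  let parent_imports : PySem.Set (String × String) :=
    PySem.Set.ofList (events_by_module.flatMap (fun p => p.2.map (fun name => (p.1, name))))
  let cd : PySem.Dict String String := PySem.Dict.ofList collisions
  let flat : List (String × (String × Option String)) :=
    PySem.List.sorted
      ((type_imports.filter (fun p =>
          !(p.2 == "ExtendedUser" || p.2 == "ExtendedGift") && !(parent_imports.contains (p.1, p.2)))).map
        (fun p => (p.1, (p.2, cd.get? p.2))))
      (fun t => t.1) false
  (pyGroupby flat).map (fun g => (g.1, PySem.List.sorted (PySem.Set.ofList g.2) (fun r => r.1) false))

-- ===== PRECONDITION & SPEC =====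
def Spec_aggregate_type_imports_py (type_imports : List (String × String)) (events_by_module : List (String × List String)) (collisions : List (String × String)) (out : List (String × (List (String × Option String)))) : Prop := out = aggregate_type_imports_py_alt type_imports events_by_module collisions
instance (type_imports : List (String × String)) (events_by_module : List (String × List String)) (collisions : List (String × String)) (out : List (String × (List (String × Option String)))) : Decidable (Spec_aggregate_type_imports_py type_imports events_by_module collisions out) := by unfold Spec_aggregate_type_imports_py; infer_instance

-- ===== CLAIM (what is proved, stated in full; the proofs are below) =====
def Claim_equal_aggregate_type_imports_py : Prop := ∀ (type_imports : List (String × String)) (events_by_module : List (String × List String)) (collisions : List (String × String)), Dom_aggregate_type_imports_py type_imports events_by_module collisions → Spec_aggregate_type_imports_py type_imports events_by_module collisions (aggregate_type_imports_py type_imports events_by_module collisions)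

-- ===== LEMMAS AND PROOFS =====

-- the surviving (module, (name, alias)) pairs, in type_imports order (proof-only abbreviation)
def pvSurv (type_imports : List (String × String)) (events_by_module : List (String × List String)) (collisions : List (String × String)) : List (String × (String × Option String)) :=
  (type_imports.filter (fun p =>
      !(p.2 == "ExtendedUser" || p.2 == "ExtendedGift") &&
      !((PySem.Set.ofList (events_by_module.flatMap (fun q => q.2.map (fun name => (q.1, name))))).contains (p.1, p.2)))).map
    (fun p => (p.1, (p.2, (PySem.Dict.ofList collisions).get? p.2)))

def pvItemsOf (m : String) (L : List (String × (String × Option String))) : List (String × Option String) :=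
  (L.filter (fun t => t.1 == m)).map (fun t => t.2)

-- folding Set.add absorbs elements already present
theorem pv_foldl_add_absorb {α : Type} [BEq α] [LawfulBEq α] (ys : List α) (s : PySem.Set α)
    (h : ∀ y ∈ ys, y ∈ s) : ys.foldl PySem.Set.add s = s := by
  induction ys with
  | nil => rfl
  | cons y ys ih =>
    have hy : PySem.Set.add s y = s := by
      simp only [PySem.Set.add, PySem.Set.contains, List.contains_eq_mem, decide_eq_true_eq]
      exact if_pos (h y (by simp))
    simp only [List.foldl_cons, hy]
    exact ih (fun z hz => h z (by simp [hz]))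

theorem pv_foldl_add_cons {α : Type} [BEq α] [LawfulBEq α] (x : α) (ys : List α) (s : List α)
    (h : ∀ y ∈ ys, y ≠ x) : ys.foldl PySem.Set.add (x :: s) = x :: ys.foldl PySem.Set.add s := by
  induction ys generalizing s with
  | nil => rfl
  | cons y ys ih =>
    have hne : y ≠ x := h y (by simp)
    have hadd : PySem.Set.add (x :: s) y = x :: PySem.Set.add s y := by
      simp only [PySem.Set.add, PySem.Set.contains, List.contains_eq_mem, decide_eq_true_eq,
        List.mem_cons, hne, false_or]
      split <;> rfl
    simp only [List.foldl_cons, hadd]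
    exact ih _ (fun z hz => h z (by simp [hz]))

theorem pv_dedup_cons_of {α : Type} [BEq α] [LawfulBEq α] (x : α) (xs ys : List α)
    (h1 : ∀ y ∈ xs, y = x) (h2 : x ∉ ys) :
    PySem.List.dedup (x :: xs ++ ys) = x :: PySem.List.dedup ys := by
  simp only [PySem.List.dedup_eq_ofList, PySem.Set.ofList_eq_foldl]
  have hadd0 : PySem.Set.add ([] : List α) x = [x] := by
    simp [PySem.Set.add, PySem.Set.contains]
  show List.foldl PySem.Set.add [] (x :: (xs ++ ys)) = _
  rw [List.foldl_cons, hadd0, List.foldl_append,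
      pv_foldl_add_absorb xs [x] (fun y hy => by simp [h1 y hy]),
      pv_foldl_add_cons x ys [] (fun y hy => fun hyx => h2 (hyx ▸ hy))]

theorem pv_ofList_sublist {α : Type} [BEq α] (xs : List α) :
    (PySem.Set.ofList xs).Sublist xs := by
  suffices h : ∀ (xs : List α) (s : List α), (xs.foldl PySem.Set.add s).Sublist (s ++ xs) by
    simpa using h xs []
  intro xs
  induction xs with
  | nil => simp
  | cons x xs ih =>
    intro s
    have h1 : ((x :: xs : List α).foldl PySem.Set.add s).Sublist (PySem.Set.add s x ++ xs) := ih _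
    refine h1.trans ?_
    by_cases hc : PySem.Set.contains s x = true
    · simp only [PySem.Set.add, hc, if_pos]
      exact List.Sublist.append_left (List.sublist_cons_self x xs) s
    · have he : PySem.Set.add s x ++ xs = s ++ x :: xs := by
        simp only [PySem.Set.contains] at hc
        simp [PySem.Set.add, PySem.Set.contains, hc]
      rw [he]

-- ofList respects permutation (up to permutation)
theorem pv_ofList_perm {α : Type} [BEq α] [LawfulBEq α] [DecidableEq α] {xs ys : List α}
    (h : xs.Perm ys) : (PySem.Set.ofList xs).Perm (PySem.Set.ofList ys) := by
  rw [List.perm_ext_iff_of_nodup (PySem.Set.nodup_ofList xs) (PySem.Set.nodup_ofList ys)]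
  intro a
  simp [PySem.Set.mem_ofList, h.mem_iff]

-- pairwise ≤ + nodup + key-injectivity on members gives pairwise <
theorem pv_pairwise_lt {α : Type} {key : α → String} {l : List α}
    (hle : l.Pairwise (fun a b => key a ≤ key b)) (hnd : l.Nodup)
    (hinj : ∀ a ∈ l, ∀ b ∈ l, key a = key b → a = b) :
    l.Pairwise (fun a b => key a < key b) := by
  refine (hle.and hnd).imp_of_mem ?_
  intro a b ha hb hab
  exact lt_of_le_of_ne hab.1 (fun he => hab.2 (hinj a ha b hb he))

-- groupby of a fst-sorted list is: first-occurrence-deduped keys, each with its filtered items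
theorem pv_pyGroupby_eq (L : List (String × (String × Option String)))
    (h : L.Pairwise (fun a b => a.1 ≤ b.1)) :
    pyGroupby L = (PySem.List.dedup (L.map (fun t => t.1))).map (fun m => (m, pvItemsOf m L)) := by
  induction L using pyGroupby.induct with
  | case1 =>
    simp [pyGroupby, PySem.List.dedup_eq_ofList, PySem.Set.ofList_eq_foldl]
  | case2 m v rest ih =>
    have hsplit : rest.takeWhile (fun t => t.1 == m) ++ rest.dropWhile (fun t => t.1 == m) = rest :=
      List.takeWhile_append_dropWhile
    have hm_rest : ∀ t ∈ rest, m ≤ t.1 := fun t ht => List.rel_of_pairwise_cons h ht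
    have hpr : rest.Pairwise (fun a b => a.1 ≤ b.1) := h.of_cons
    have hrun_eq : ∀ t ∈ rest.takeWhile (fun t => t.1 == m), t.1 = m := by
      intro t ht
      simpa using List.mem_takeWhile_imp ht
    have hr2sub : (rest.dropWhile (fun t => t.1 == m)).Sublist rest := List.dropWhile_sublist _
    have hp2 : (rest.dropWhile (fun t => t.1 == m)).Pairwise (fun a b => a.1 ≤ b.1) :=
      hpr.sublist hr2sub
    have hr2ne : ∀ t ∈ rest.dropWhile (fun t => t.1 == m), t.1 ≠ m := by
      intro t ht heq
      cases hr2c : rest.dropWhile (fun t => t.1 == m) with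
      | nil => rw [hr2c] at ht; exact absurd ht (List.not_mem_nil)
      | cons hd tl =>
        have hne : (rest.dropWhile (fun t => t.1 == m)) ≠ [] := by simp [hr2c]
        have hhd0 := List.head_dropWhile_not (fun t : String × String × Option String => t.1 == m) hne
        have hhd : ((rest.dropWhile (fun t => t.1 == m)).head hne).1 ≠ m := by
          simpa using hhd0
        have hhead : (rest.dropWhile (fun t => t.1 == m)).head hne = hd := by
          simp [hr2c]
        rw [hhead] at hhd
        have hmhd : m ≤ hd.1 := hm_rest hd (hr2sub.subset (by simp [hr2c]))
        have hmlt : m < hd.1 := lt_of_le_of_ne hmhd (Ne.symm hhd)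
        rcases List.mem_cons.mp (hr2c ▸ ht) with rfl | htl
        · exact hhd heq
        · have hle := List.rel_of_pairwise_cons (hr2c ▸ hp2) htl
          exact absurd (show hd.1 ≤ m from heq ▸ hle) (not_le.mpr hmlt)
    have hfilter_rest : rest.filter (fun t => t.1 == m) = rest.takeWhile (fun t => t.1 == m) := by
      conv_lhs => rw [← hsplit]
      rw [List.filter_append,
        List.filter_eq_self.mpr (fun t ht => by simp [hrun_eq t ht]),
        List.filter_eq_nil_iff.mpr (fun t ht => by simp [hr2ne t ht])]
      simp
    have hitems : pvItemsOf m ((m, v) :: rest) =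
        v :: (rest.takeWhile (fun t => t.1 == m)).map (fun t => t.2) := by
      unfold pvItemsOf
      rw [List.filter_cons]
      simp [hfilter_rest]
    have hfilter2 : ∀ m', m' ≠ m → rest.filter (fun t => t.1 == m') =
        (rest.dropWhile (fun t => t.1 == m)).filter (fun t => t.1 == m') := by
      intro m' hm'
      conv_lhs => rw [← hsplit]
      rw [List.filter_append,
        List.filter_eq_nil_iff.mpr (fun t ht => by simp [hrun_eq t ht, Ne.symm hm'])]
      simp
    have hitems2 : ∀ m', m' ≠ m →
        pvItemsOf m' ((m, v) :: rest) = pvItemsOf m' (rest.dropWhile (fun t => t.1 == m)) := by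
      intro m' hm'
      unfold pvItemsOf
      rw [List.filter_cons]
      simp [beq_iff_eq, Ne.symm hm', hfilter2 m' hm']
    have hmapL : ((m, v) :: rest).map (fun t => t.1) =
        m :: ((rest.takeWhile (fun t => t.1 == m)).map (fun t => t.1) ++
              (rest.dropWhile (fun t => t.1 == m)).map (fun t => t.1)) := by
      rw [← List.map_append, hsplit]
      rfl
    have hdedup : PySem.List.dedup
        (m :: ((rest.takeWhile (fun t => t.1 == m)).map (fun t => t.1) ++
               (rest.dropWhile (fun t => t.1 == m)).map (fun t => t.1))) =
        m :: PySem.List.dedup ((rest.dropWhile (fun t => t.1 == m)).map (fun t => t.1)) :=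
      pv_dedup_cons_of m _ _
        (fun y hy => by
          rcases List.mem_map.mp hy with ⟨t, ht, rfl⟩
          exact hrun_eq t ht)
        (fun hy => by
          rcases List.mem_map.mp hy with ⟨t, ht, he⟩
          exact hr2ne t ht he)
    rw [pyGroupby, hmapL, hdedup, List.map_cons, ih hp2, hitems]
    refine congrArg₂ _ rfl ?_
    apply List.map_congr_left
    intro m' hm'
    have hm'mem : m' ∈ (rest.dropWhile (fun t => t.1 == m)).map (fun t => t.1) :=
      (PySem.List.mem_dedup _ _).mp hm'
    have hm'ne : m' ≠ m := by
      rcases List.mem_map.mp hm'mem with ⟨t, ht, rfl⟩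
      exact hr2ne t ht
    rw [hitems2 m' hm'ne]

-- A's output in canonical form
theorem pv_portA_eq (type_imports : List (String × String)) (events_by_module : List (String × List String)) (collisions : List (String × String)) :
    aggregate_type_imports_py type_imports events_by_module collisions =
      (PySem.List.sorted (PySem.Set.ofList ((pvSurv type_imports events_by_module collisions).map (fun t => t.1))) (fun x => x) false).map
        (fun m => (m, PySem.List.sorted (PySem.Set.ofList (pvItemsOf m (pvSurv type_imports events_by_module collisions))) (fun r => r.1) false)) := by
  simp only [aggregate_type_imports_py]
  have hbody : (fun (d : PySem.Dict String (List (String × Option String))) (p : String × String) =>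
      if p.2 == "ExtendedUser" || p.2 == "ExtendedGift" then d
      else if (PySem.Set.ofList (events_by_module.flatMap (fun q => q.2.map (fun name => (q.1, name))))).contains (p.1, p.2) then d
      else d.modify p.1 [] (fun items => items ++ [(p.2, (PySem.Dict.ofList collisions).get? p.2)]))
    = (fun d p =>
      if (!(p.2 == "ExtendedUser" || p.2 == "ExtendedGift") &&
          !((PySem.Set.ofList (events_by_module.flatMap (fun q => q.2.map (fun name => (q.1, name))))).contains (p.1, p.2))) = true
      then d.modify p.1 [] (fun items => items ++ [(p.2, (PySem.Dict.ofList collisions).get? p.2)]) else d) := by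
    funext d p
    split_ifs <;> simp_all
    rcases ‹∃ a b, (a, b) ∈ events_by_module ∧ ∃ a_1 ∈ b, (a, a_1) = p› with ⟨a, b, hab, c, hc, hp⟩
    exact absurd hp
      (‹∀ (x : String) (x_1 : List String), (x, x_1) ∈ events_by_module → ∀ x_2 ∈ x_1, ¬(x, x_2) = p› a b hab c hc)
  rw [hbody, ← List.foldl_filter]
  have hmapfold : (List.foldl (fun (d : PySem.Dict String (List (String × Option String))) (p : String × String) =>
        d.modify p.1 [] (fun items => items ++ [(p.2, (PySem.Dict.ofList collisions).get? p.2)])) PySem.Dict.empty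
        (type_imports.filter (fun p =>
          !(p.2 == "ExtendedUser" || p.2 == "ExtendedGift") &&
          !((PySem.Set.ofList (events_by_module.flatMap (fun q => q.2.map (fun name => (q.1, name))))).contains (p.1, p.2)))))
      = List.foldl (fun d t => d.modify t.1 [] (fun items => items ++ [t.2])) PySem.Dict.empty
          (pvSurv type_imports events_by_module collisions) := by
    simp only [pvSurv, List.foldl_map]
  rw [hmapfold]
  have hkeys : (List.foldl (fun d t => d.modify t.1 [] (fun items => items ++ [t.2])) PySem.Dict.empty
      (pvSurv type_imports events_by_module collisions)).keys
      = PySem.Set.ofList ((pvSurv type_imports events_by_module collisions).map (fun t => t.1)) := by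
    have h0 := PySem.Dict.keys_foldl_modify_key (pvSurv type_imports events_by_module collisions)
      (fun t : String × (String × Option String) => t.1) ([] : List (String × Option String))
      (fun _ t => fun items => items ++ [t.2]) PySem.Dict.empty
    simpa [PySem.Dict.keys_empty, PySem.Set.update_empty] using h0
  have hnodup : (List.foldl (fun d t => d.modify t.1 [] (fun items => items ++ [t.2])) PySem.Dict.empty
      (pvSurv type_imports events_by_module collisions)).keys.Nodup := by
    have h0 := PySem.Dict.nodup_keys_foldl_modify_key (pvSurv type_imports events_by_module collisions)
      (fun t : String × (String × Option String) => t.1) ([] : List (String × Option String))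
      (fun _ t => fun items => items ++ [t.2]) PySem.Dict.empty PySem.Dict.nodup_keys_empty
    simpa using h0
  have hgetD : ∀ k, (List.foldl (fun d t => d.modify t.1 [] (fun items => items ++ [t.2])) PySem.Dict.empty
      (pvSurv type_imports events_by_module collisions)).getD k []
      = pvItemsOf k (pvSurv type_imports events_by_module collisions) := by
    intro k
    have h0 := PySem.Dict.getD_foldl_modify_append (pvSurv type_imports events_by_module collisions)
      PySem.Dict.empty k
    simpa [pvItemsOf, PySem.Dict.getD_empty] using h0
  have hitems : (List.foldl (fun d t => d.modify t.1 [] (fun items => items ++ [t.2])) PySem.Dict.empty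
      (pvSurv type_imports events_by_module collisions)).items
      = (PySem.Set.ofList ((pvSurv type_imports events_by_module collisions).map (fun t => t.1))).map
          (fun k => (k, pvItemsOf k (pvSurv type_imports events_by_module collisions))) := by
    rw [PySem.Dict.items_eq_map_keys _ hnodup [], hkeys]
    exact List.map_congr_left (fun k _ => by rw [hgetD k])
  have hsorted : PySem.List.sorted (List.foldl (fun d t => d.modify t.1 [] (fun items => items ++ [t.2])) PySem.Dict.empty
      (pvSurv type_imports events_by_module collisions)).items (fun q => q.1) false
      = (PySem.List.sorted (PySem.Set.ofList ((pvSurv type_imports events_by_module collisions).map (fun t => t.1))) (fun x => x) false).map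
          (fun k => (k, pvItemsOf k (pvSurv type_imports events_by_module collisions))) := by
    apply PySem.List.sorted_eq_of_perm_of_pairwise_lt
    · rw [hitems]
      exact (PySem.List.sorted_perm _ _ _).map _
    · rw [List.pairwise_map]
      simpa using PySem.List.sorted_ofList_pairwise_lt
        ((pvSurv type_imports events_by_module collisions).map (fun t => t.1))
  rw [hsorted, List.map_map]
  rfl

-- B's output in canonical form
theorem pv_portB_eq (type_imports : List (String × String)) (events_by_module : List (String × List String)) (collisions : List (String × String)) :
    aggregate_type_imports_py_alt type_imports events_by_module collisions =
      (PySem.List.sorted (PySem.Set.ofList ((pvSurv type_imports events_by_module collisions).map (fun t => t.1))) (fun x => x) false).map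
        (fun m => (m, PySem.List.sorted (PySem.Set.ofList (pvItemsOf m (pvSurv type_imports events_by_module collisions))) (fun r => r.1) false)) := by
  show (pyGroupby (PySem.List.sorted (pvSurv type_imports events_by_module collisions) (fun t => t.1) false)).map
      (fun g => (g.1, PySem.List.sorted (PySem.Set.ofList g.2) (fun r => r.1) false)) = _
  set S := PySem.List.sorted (pvSurv type_imports events_by_module collisions) (fun t => t.1) false with hS
  have hSp : S.Pairwise (fun a b => a.1 ≤ b.1) :=
    PySem.List.sorted_pairwise (pvSurv type_imports events_by_module collisions) (fun t => t.1)
  have hperm : S.Perm (pvSurv type_imports events_by_module collisions) := PySem.List.sorted_perm _ _ _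
  rw [pv_pyGroupby_eq S hSp, List.map_map]
  have hmods : PySem.List.dedup (S.map (fun t => t.1))
      = PySem.List.sorted (PySem.Set.ofList ((pvSurv type_imports events_by_module collisions).map (fun t => t.1))) (fun x => x) false := by
    symm
    apply PySem.List.sorted_eq_of_perm_of_pairwise_lt
    · rw [PySem.List.dedup_eq_ofList]
      exact pv_ofList_perm (hperm.map _)
    · have hsub : (PySem.List.dedup (S.map (fun t => t.1))).Sublist (S.map (fun t => t.1)) := by
        rw [PySem.List.dedup_eq_ofList]
        exact pv_ofList_sublist _
      have hle : (S.map (fun t => t.1)).Pairwise (fun a b => a ≤ b) := List.pairwise_map.mpr hSp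
      have hnd : (PySem.List.dedup (S.map (fun t => t.1))).Nodup := by
        rw [PySem.List.dedup_eq_ofList]
        exact PySem.Set.nodup_ofList _
      exact pv_pairwise_lt (key := fun x => x) (hle.sublist hsub) hnd (fun a _ b _ h => h)
  have hshape2 : ∀ m, ∀ y ∈ pvItemsOf m (pvSurv type_imports events_by_module collisions),
      y.2 = (PySem.Dict.ofList collisions).get? y.1 := by
    intro m y hy
    unfold pvItemsOf at hy
    rcases List.mem_map.mp hy with ⟨t, htf, rfl⟩
    have ht : t ∈ pvSurv type_imports events_by_module collisions := List.mem_of_mem_filter htf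
    unfold pvSurv at ht
    rcases List.mem_map.mp ht with ⟨p, _, rfl⟩
    rfl
  have hitemsperm : ∀ m, (pvItemsOf m S).Perm (pvItemsOf m (pvSurv type_imports events_by_module collisions)) :=
    fun m => (hperm.filter _).map _
  have hgrp : ∀ m, PySem.List.sorted (PySem.Set.ofList (pvItemsOf m S)) (fun r => r.1) false
      = PySem.List.sorted (PySem.Set.ofList (pvItemsOf m (pvSurv type_imports events_by_module collisions))) (fun r => r.1) false := by
    intro m
    apply PySem.List.sorted_eq_of_perm_of_pairwise_lt
    · exact (PySem.List.sorted_perm _ _ _).trans (pv_ofList_perm (hitemsperm m).symm)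
    · refine pv_pairwise_lt (PySem.List.sorted_pairwise _ _) ?_ ?_
      · exact ((PySem.List.sorted_perm _ _ _).nodup_iff).mpr (PySem.Set.nodup_ofList _)
      · intro a ha b hb hab
        have ha' : a ∈ pvItemsOf m (pvSurv type_imports events_by_module collisions) :=
          (PySem.Set.mem_ofList _ _).mp ((PySem.List.mem_sorted _ _ _ _).mp ha)
        have hb' : b ∈ pvItemsOf m (pvSurv type_imports events_by_module collisions) :=
          (PySem.Set.mem_ofList _ _).mp ((PySem.List.mem_sorted _ _ _ _).mp hb)
        have hea := hshape2 m a ha'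
        have heb := hshape2 m b hb'
        exact Prod.ext_iff.mpr ⟨hab, by rw [hea, hab, ← heb]⟩
  rw [hmods]
  apply List.map_congr_left
  intro m _
  simp only [Function.comp]
  rw [hgrp m]

-- ===== VERDICT (by name: the statement is the Claim_ definition above) =====
theorem aggregate_type_imports_py_spec : Claim_equal_aggregate_type_imports_py := by
  intro ti ebm col _
  unfold Spec_aggregate_type_imports_py
  rw [pv_portA_eq, pv_portB_eq]
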